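-- pv_equiv track=rewrite | github.com/Chiki1601/Hackerearth-Solutions | Basic Programming/Basics of Implementation/Count the Submatrices.py | Solve
-- ===== SOURCE A (Python) =====
-- def Solve(M, N, P, Matrix):
--     # write your code here
--     # return your answer
--     res = 0
--     for i in range(M):
--         sums = [0] * N
--         for j in range(i, M):
--             counts = [0] * 200
--             counts[0] = 1
--             for k in range(N):
--                 sums[k] += Matrix[j][k]
--             x = 0
--             for k in range(N):
--                 x = (x + sums[k]) % P
--                 res += counts[x]
--                 counts[x] += 1
--     return res
--
-- Matrix = []
-- ===== SOURCE B (Python) =====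
-- def Solve(M, N, P, Matrix):
--     # Sort-and-group counting: one 2D prefix table; per row pair, sort the column
--     # prefix residues and count equal pairs by scanning runs (no residue counter).
--     if M <= 0 or N <= 0:
--         return 0
--     S = [[0] * (N + 1)]
--     for r in range(M):
--         rp = [0]
--         for c in range(N):
--             rp.append(rp[c] + Matrix[r][c])
--         S.append([a + b for a, b in zip(S[r], rp)])
--     res = 0
--     for i in range(M):
--         for j in range(i, M):
--             rs = sorted((S[j + 1][k] - S[i][k]) % P for k in range(N + 1))
--             prev = None
--             run = 0
--             for v in rs:
--                 if v == prev:
--                     res += run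
--                     run += 1
--                 else:
--                     prev = v
--                     run = 1
--     return res
-- ===== Notes on version B (the rewrite author's own statement) =====
-- stated objective: alternative
-- what changed: B counts equal prefix residues by sorting each row pair's column prefix residues (read from one precomputed 2D prefix-sum table) and scanning runs of equal values, instead of A's rolling per-row-pair sums array with an online 200-slot residue counter.
-- outside the precondition, e.g. on Solve(1, 1, 1000, [[5]]): A returns 0, B returns 0
import Mathlib
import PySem

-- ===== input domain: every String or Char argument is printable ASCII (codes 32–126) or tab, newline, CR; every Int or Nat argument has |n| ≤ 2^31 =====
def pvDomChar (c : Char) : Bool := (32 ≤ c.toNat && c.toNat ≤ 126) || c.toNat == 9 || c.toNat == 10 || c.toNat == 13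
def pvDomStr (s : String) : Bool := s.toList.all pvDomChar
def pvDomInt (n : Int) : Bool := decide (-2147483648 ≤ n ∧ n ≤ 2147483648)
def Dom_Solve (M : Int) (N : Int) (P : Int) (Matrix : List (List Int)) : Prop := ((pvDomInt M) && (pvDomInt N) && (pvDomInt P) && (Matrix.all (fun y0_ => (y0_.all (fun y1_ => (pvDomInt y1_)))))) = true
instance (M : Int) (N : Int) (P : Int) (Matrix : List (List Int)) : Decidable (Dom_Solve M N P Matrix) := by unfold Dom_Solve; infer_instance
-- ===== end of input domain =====

set_option maxRecDepth 8000


-- B replaces A's online residue-counter counting by sort-and-group counting: one precomputed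
-- 2D prefix table, and per row pair the column prefix residues are sorted and equal pairs are
-- counted by a run scan over the sorted list (objective: alternative algorithm).

-- ===== PORT A =====
def Solve (M : Int) (N : Int) (P : Int) (Matrix : List (List Int)) : Int :=
  (PySem.List.pyRange 0 M 1).foldl (fun res i =>
    let sums0 : List Int := List.replicate N.toNat 0
    ((PySem.List.pyRange i M 1).foldl (fun (st : List Int × Int) j =>
      let counts0 : List Int := PySem.List.pySetD (List.replicate 200 (0:Int)) 0 1
      let sums := (PySem.List.pyRange 0 N 1).foldl (fun s k =>
          PySem.List.pySetD s k (PySem.List.pyGetD s k 0 +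
            PySem.List.pyGetD (PySem.List.pyGetD Matrix j []) k 0)) st.1
      let fin := (PySem.List.pyRange 0 N 1).foldl (fun (st2 : List Int × Int × Int) k =>
          let x := PySem.Int.mod (st2.2.1 + PySem.List.pyGetD sums k 0) P
          (PySem.List.pySetD st2.1 x (PySem.List.pyGetD st2.1 x 0 + 1), x,
            st2.2.2 + PySem.List.pyGetD st2.1 x 0)) (counts0, 0, st.2)
      (sums, fin.2.2)) (sums0, res)).2) 0

-- ===== PORT B =====
def Solve_alt (M : Int) (N : Int) (P : Int) (Matrix : List (List Int)) : Int :=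
  if M ≤ 0 ∨ N ≤ 0 then 0 else
  let S := (PySem.List.pyRange 0 M 1).foldl (fun S r =>
      let rp := (PySem.List.pyRange 0 N 1).foldl (fun rp c =>
          rp ++ [PySem.List.pyGetD rp c 0 +
            PySem.List.pyGetD (PySem.List.pyGetD Matrix r []) c 0]) [0]
      S ++ [List.zipWith (· + ·) (PySem.List.pyGetD S r []) rp])
    [List.replicate (N + 1).toNat 0]
  (PySem.List.pyRange 0 M 1).foldl (fun res i =>
    (PySem.List.pyRange i M 1).foldl (fun res j =>
      let rs := PySem.List.sorted ((PySem.List.pyRange 0 (N + 1) 1).map (fun k =>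
        PySem.Int.mod (PySem.List.pyGetD (PySem.List.pyGetD S (j + 1) []) k 0
          - PySem.List.pyGetD (PySem.List.pyGetD S i []) k 0) P)) (fun x => x) false
      (rs.foldl (fun (st : Option Int × Int × Int) v =>
          if st.1 = some v then (st.1, st.2.1 + 1, st.2.2 + st.2.1)
          else (some v, 1, st.2.2)) (none, 0, res)).2.2) res) 0

-- ===== PRECONDITION & SPEC =====
-- Pre_ excludes the inputs where A raises: P = 0 (ZeroDivisionError) and matrices with fewer
-- than M rows or rows shorter than N (IndexError) whenever the loops run, and also |P| > 200,
-- where A's fixed 200-slot counts list raises IndexError as soon as a prefix residue reaches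
-- slot 200 (on the rare |P| > 200 inputs whose residues all stay in range A returns the
-- correct count and B agrees).
def Pre_Solve (M : Int) (N : Int) (P : Int) (Matrix : List (List Int)) : Prop :=
  M ≤ 0 ∨ N ≤ 0 ∨
    (P ≠ 0 ∧ -200 ≤ P ∧ P ≤ 200 ∧ M ≤ (Matrix.length : Int) ∧
      ∀ row ∈ Matrix.take M.toNat, N ≤ (row.length : Int))
instance (M : Int) (N : Int) (P : Int) (Matrix : List (List Int)) : Decidable (Pre_Solve M N P Matrix) := by
  unfold Pre_Solve; infer_instance
def pvWitness_Solve : Int × Int × Int × List (List Int) := (2, 2, 3, [[1, 2], [3, 4]])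

def Spec_Solve (M : Int) (N : Int) (P : Int) (Matrix : List (List Int)) (out : Int) : Prop := out = Solve_alt M N P Matrix
instance (M : Int) (N : Int) (P : Int) (Matrix : List (List Int)) (out : Int) : Decidable (Spec_Solve M N P Matrix out) := by unfold Spec_Solve; infer_instance

-- ===== CLAIM (what is proved, stated in full; the proofs are below) =====
def Claim_equal_Solve : Prop := ∀ (M : Int) (N : Int) (P : Int) (Matrix : List (List Int)), Dom_Solve M N P Matrix → Pre_Solve M N P Matrix → Spec_Solve M N P Matrix (Solve M N P Matrix)

-- ===== LEMMAS AND PROOFS =====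

-- Nat-world descriptions of the data both programs compute
def pvCell (Mat : List (List Int)) (r c : Nat) : Int := (Mat.getD r []).getD c 0
def pvRp (Mat : List (List Int)) (r c : Nat) : Int := ∑ c' ∈ Finset.range c, pvCell Mat r c'
def pvSval (Mat : List (List Int)) (r c : Nat) : Int := ∑ r' ∈ Finset.range r, pvRp Mat r' c
def pvColS (Mat : List (List Int)) (i e k : Nat) : Int := ∑ r ∈ Finset.Ico i e, pvCell Mat r k
def pvBpref (Mat : List (List Int)) (i e k : Nat) : Int := ∑ c ∈ Finset.range k, pvColS Mat i e c
def pvCounts0 : List Int := (List.replicate 200 (0:Int)).set 0 1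
def pvIdx (r : Int) : Nat := if 0 ≤ r then r.toNat else 200 - (-r).toNat

-- number of pairs a < b with l[a] = l[b]
def pvPC : List Int → Int
  | [] => 0
  | x :: xs => (xs.count x : Int) + pvPC xs

-- trivial-loop lemma
theorem pv_foldl_id {α β : Type} (l : List α) (b : β) : l.foldl (fun b _ => b) b = b := by
  induction l generalizing b with
  | nil => rfl
  | cons x t ih => simpa using ih b

-- floor-mod facts
theorem pv_mod_add (P s v : Int) :
    PySem.Int.mod (PySem.Int.mod s P + v) P = PySem.Int.mod (s + v) P := by
  show Int.fmod _ _ = Int.fmod _ _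
  show (Int.fmod s P + v).fmod P = _
  rw [Int.fmod_def s P]
  rw [← Int.add_mul_fmod_self_left (s + v) P (-(s.fdiv P))]
  congr 1
  ring

theorem pv_mod_idem (P a : Int) : PySem.Int.mod (PySem.Int.mod a P) P = PySem.Int.mod a P := by
  simpa using pv_mod_add P a 0

theorem pv_res_bounds (P r : Int) (hP : P ≠ 0) (h1 : -200 ≤ P) (h2 : P ≤ 200)
    (hr : PySem.Int.mod r P = r) : -200 < r ∧ r < 200 ∧ (0 < P → 0 ≤ r) ∧ (P < 0 → r ≤ 0) := by
  rcases lt_or_gt_of_ne hP with hneg | hpos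
  · have h := PySem.Int.mod_neg_bounds r hneg
    rw [hr] at h
    refine ⟨by omega, by omega, by omega, by omega⟩
  · have ha := PySem.Int.mod_nonneg r hpos
    have hb := PySem.Int.mod_lt r hpos
    rw [hr] at ha hb
    refine ⟨by omega, by omega, by omega, by omega⟩

theorem pvIdx_inj (P r q : Int) (hP : P ≠ 0) (h1 : -200 ≤ P) (h2 : P ≤ 200)
    (hr : PySem.Int.mod r P = r) (hq : PySem.Int.mod q P = q) (h : pvIdx r = pvIdx q) : r = q := by
  obtain ⟨hr1, hr2, hr3, hr4⟩ := pv_res_bounds P r hP h1 h2 hr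
  obtain ⟨hq1, hq2, hq3, hq4⟩ := pv_res_bounds P q hP h1 h2 hq
  rcases lt_or_gt_of_ne hP with hneg | hpos <;>
    (unfold pvIdx at h; split_ifs at h <;> omega)

theorem pvIdx_lt (r : Int) (h1 : -200 ≤ r) (h2 : r < 200) : pvIdx r < 200 := by
  unfold pvIdx; split_ifs <;> omega

theorem pvGet_eq (counts : List Int) (h : counts.length = 200) (r : Int)
    (h1 : -200 ≤ r) (h2 : r < 200) :
    PySem.List.pyGetD counts r 0 = counts.getD (pvIdx r) 0 := by
  unfold PySem.List.pyGetD PySem.List.pyGet? PySem.List.pyIdx? pvIdx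
  rw [h]
  split_ifs with ha hb hc <;> simp_all [List.getD_eq_getElem?_getD] <;> omega

theorem pvSet_eq (counts : List Int) (h : counts.length = 200) (r : Int) (v : Int)
    (h1 : -200 ≤ r) (h2 : r < 200) :
    PySem.List.pySetD counts r v = counts.set (pvIdx r) v := by
  unfold PySem.List.pySetD PySem.List.pySet? PySem.List.pyIdx? pvIdx
  rw [h]
  split_ifs with ha hb hc <;> simp_all <;> omega

theorem pv_getD_set (l : List Int) (n t : Nat) (v : Int) (hn : n < l.length) :
    (l.set n v).getD t 0 = if t = n then v else l.getD t 0 := by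
  simp only [List.getD_eq_getElem?_getD, List.getElem?_set]
  rcases eq_or_ne t n with h | h
  · simp [h, hn]
  · simp [h, Ne.symm h]

-- pair-count facts
theorem pvPC_perm {l l' : List Int} (h : l.Perm l') : pvPC l = pvPC l' := by
  induction h with
  | nil => rfl
  | cons x h ih => simp [pvPC, ih, h.count_eq]
  | swap x y l =>
    by_cases h : x = y
    · subst h; rfl
    · simp only [pvPC, List.count_cons]
      simp [h, Ne.symm h]
      push_cast
      ring
  | trans h1 h2 ih1 ih2 => omega

theorem pvPC_append_singleton (l : List Int) (e : Int) :
    pvPC (l ++ [e]) = pvPC l + (l.count e : Int) := by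
  induction l with
  | nil => simp [pvPC]
  | cons x xs ih =>
    by_cases h : x = e
    · subst h
      simp only [List.cons_append, pvPC, ih, List.count_append, List.count_cons]
      push_cast
      simp
      ring
    · simp only [List.cons_append, pvPC, ih, List.count_append, List.count_cons]
      simp [List.count_singleton', h, Ne.symm h]
      push_cast
      ring

-- B's run scan over a sorted list counts the equal pairs
theorem pvRun (l : List Int) (hs : l.Pairwise (· ≤ ·)) :
    ∀ (p r res : Int), (∀ x ∈ l, p ≤ x) →
    (l.foldl (fun (st : Option Int × Int × Int) v =>
        if st.1 = some v then (st.1, st.2.1 + 1, st.2.2 + st.2.1)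
        else (some v, 1, st.2.2)) (some p, r, res)).2.2
      = res + pvPC l + r * (l.count p : Int) := by
  induction l with
  | nil => intro p r res _; simp [pvPC]
  | cons v vs ih =>
    intro p r res hle
    have hvvs : ∀ x ∈ vs, v ≤ x := (List.pairwise_cons.mp hs).1
    have hvs : vs.Pairwise (· ≤ ·) := (List.pairwise_cons.mp hs).2
    rw [List.foldl_cons]
    by_cases hpv : p = v
    · subst hpv
      rw [if_pos rfl]
      simp only []
      rw [ih hvs p (r + 1) (res + r) hvvs]
      simp only [pvPC, List.count_cons, BEq.rfl, if_pos]
      push_cast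
      ring
    · rw [if_neg (by simp [hpv])]
      simp only []
      rw [ih hvs v 1 res hvvs]
      have hpnot : (v :: vs).count p = 0 := by
        rw [List.count_eq_zero]
        intro hmem
        rcases List.mem_cons.mp hmem with h | h
        · exact hpv h
        · have h1 := hvvs p h
          have h2 := hle v List.mem_cons_self
          omega
      rw [hpnot]
      simp only [pvPC]
      push_cast
      ring

theorem pvRunNone (l : List Int) (hs : l.Pairwise (· ≤ ·)) (res : Int) :
    (l.foldl (fun (st : Option Int × Int × Int) v =>
        if st.1 = some v then (st.1, st.2.1 + 1, st.2.2 + st.2.1)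
        else (some v, 1, st.2.2)) (none, 0, res)).2.2
      = res + pvPC l := by
  cases l with
  | nil => simp [pvPC]
  | cons v vs =>
    rw [List.foldl_cons, if_neg (by simp)]
    simp only []
    rw [pvRun vs (List.pairwise_cons.mp hs).2 v 1 res (List.pairwise_cons.mp hs).1]
    simp only [pvPC]
    push_cast
    ring

-- the central A-side lemma: the 200-slot counter loop accumulates the equal-residue pair count
theorem pvCntA (P : Int) (hP : P ≠ 0) (hl : -200 ≤ P) (hr : P ≤ 200) (F G : Nat → Int)
    (hG : ∀ k, G (k + 1) = G k + F k) :
    ∀ (cnt a : Nat) (counts seen : List Int) (res : Int),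
    counts.length = 200 →
    (∀ r, PySem.Int.mod r P = r → PySem.List.pyGetD counts r 0 = ((seen.count r : Nat) : Int)) →
    ((List.range' a cnt).foldl (fun (st2 : List Int × Int × Int) k =>
        let x := PySem.Int.mod (st2.2.1 + F k) P
        (PySem.List.pySetD st2.1 x (PySem.List.pyGetD st2.1 x 0 + 1), x,
          st2.2.2 + PySem.List.pyGetD st2.1 x 0)) (counts, PySem.Int.mod (G a) P, res)).2.2
    = res + pvPC (seen ++ (List.range' a cnt).map (fun k => PySem.Int.mod (G (k + 1)) P))
        - pvPC seen := by
  intro cnt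
  induction cnt with
  | zero => intro a counts seen res _ _; simp
  | succ cnt ih =>
    intro a counts seen res hlen hcoup
    rw [List.range'_succ, List.foldl_cons, List.map_cons]
    simp only []
    have hx : PySem.Int.mod (PySem.Int.mod (G a) P + F a) P = PySem.Int.mod (G (a + 1)) P := by
      rw [pv_mod_add, ← hG]
    rw [hx]
    set x := PySem.Int.mod (G (a + 1)) P with hxdef
    have hxres : PySem.Int.mod x P = x := pv_mod_idem P (G (a + 1))
    obtain ⟨hxb1, hxb2, _, _⟩ := pv_res_bounds P x hP hl hr hxres
    have hxlt : pvIdx x < 200 := pvIdx_lt x (by omega) (by omega)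
    have hresx : PySem.List.pyGetD counts x 0 = ((seen.count x : Nat) : Int) := hcoup x hxres
    rw [hresx]
    have hlen' : (PySem.List.pySetD counts x (((seen.count x : Nat) : Int) + 1)).length = 200 := by
      rw [PySem.List.length_pySetD]; exact hlen
    have hcoup' : ∀ r, PySem.Int.mod r P = r →
        PySem.List.pyGetD (PySem.List.pySetD counts x (((seen.count x : Nat) : Int) + 1)) r 0
          = (((seen ++ [x]).count r : Nat) : Int) := by
      intro r hrr
      obtain ⟨hr1, hr2, _, _⟩ := pv_res_bounds P r hP hl hr hrr
      rw [pvSet_eq counts hlen x _ (by omega) (by omega)]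
      rw [pvGet_eq _ (by rw [List.length_set]; exact hlen) r (by omega) (by omega)]
      rw [pv_getD_set _ _ _ _ (by rw [hlen]; exact hxlt)]
      rw [List.count_append]
      by_cases hidx : pvIdx r = pvIdx x
      · have hrx : r = x := pvIdx_inj P r x hP hl hr hrr hxres hidx
        subst hrx
        rw [if_pos hidx]
        simp
      · have hrx : r ≠ x := fun h => hidx (by rw [h])
        rw [if_neg hidx]
        have hc1 : ([x].count r) = 0 := by
          simp [List.count_singleton', hrx.symm]
        rw [hc1, ← pvGet_eq counts hlen r (by omega) (by omega), hcoup r hrr]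
        simp
    rw [ih (a + 1) _ (seen ++ [x]) _ hlen' hcoup']
    rw [pvPC_append_singleton, List.append_assoc, List.singleton_append]
    omega

theorem pvInitCoupling (P : Int) (hP : P ≠ 0) (hl : -200 ≤ P) (hr : P ≤ 200) :
    ∀ r, PySem.Int.mod r P = r →
      PySem.List.pyGetD pvCounts0 r 0 = ((([(0:Int)].count r : Nat)) : Int) := by
  intro r hrr
  have hres0 : PySem.Int.mod (0:Int) P = 0 := Int.zero_fmod P
  obtain ⟨hb1, hb2, _, _⟩ := pv_res_bounds P r hP hl hr hrr
  have hlen : pvCounts0.length = 200 := by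
    unfold pvCounts0; rw [List.length_set, List.length_replicate]
  have hidx0 : pvIdx (0:Int) = 0 := by simp [pvIdx]
  rw [pvGet_eq pvCounts0 hlen r (by omega) (by omega)]
  unfold pvCounts0
  rw [pv_getD_set _ _ _ _ (by simp)]
  by_cases hzero : r = 0
  · subst hzero
    rw [hidx0, if_pos rfl]
    simp
  · have hne : pvIdx r ≠ pvIdx 0 := fun h => hzero (pvIdx_inj P r 0 hP hl hr hrr hres0 h)
    rw [hidx0] at hne
    rw [if_neg hne, List.getD_eq_getElem?_getD, List.getElem?_replicate]
    have hlt : pvIdx r < 200 := pvIdx_lt r (by omega) (by omega)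
    rw [if_pos hlt]
    simp [List.count_singleton']
    omega

theorem pvCounts0_len : pvCounts0.length = 200 := by
  unfold pvCounts0; rw [List.length_set, List.length_replicate]

-- A's sums-update loop
theorem pvAddLoop (g f : Nat → Int) :
    ∀ (n : Nat) (tail : List Int),
    (List.range n).foldl (fun s k => s.set k (s.getD k 0 + g k)) ((List.range n).map f ++ tail)
      = (List.range n).map (fun k => f k + g k) ++ tail := by
  intro n
  induction n with
  | zero => intro tail; simp
  | succ n ih =>
    intro tail
    rw [List.range_succ]
    simp only [List.map_append, List.map_cons, List.map_nil, List.foldl_append,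
      List.append_assoc, List.singleton_append]
    rw [ih (f n :: tail)]
    simp only [List.foldl_cons, List.foldl_nil]
    have hlen : ((List.range n).map (fun k => f k + g k)).length = n := by simp
    have hget : (((List.range n).map (fun k => f k + g k)) ++ (f n :: tail)).getD n 0 = f n := by
      rw [List.getD_eq_getElem?_getD, List.getElem?_append_right (by omega)]
      simp [hlen]
    rw [hget, List.set_append, if_neg (by omega), hlen]
    simp

-- B's row-prefix build
theorem pvRpBuild (Mat : List (List Int)) (r : Nat) :
    ∀ (n : Nat),
    (List.range n).foldl (fun rp c => rp ++ [rp.getD c 0 + pvCell Mat r c]) [0]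
      = (List.range (n + 1)).map (pvRp Mat r) := by
  intro n
  induction n with
  | zero => simp [pvRp]
  | succ n ih =>
    rw [List.range_succ, List.foldl_append, ih]
    simp only [List.foldl_cons, List.foldl_nil]
    rw [PySem.List.getD_map_range _ _ _ _ (by omega)]
    rw [show List.range (n + 1 + 1) = List.range (n + 1) ++ [n + 1] from List.range_succ,
      List.map_append]
    congr 1
    simp [pvRp, Finset.sum_range_succ]

-- B's table build
theorem pvSBuild (Mat : List (List Int)) (n : Nat) :
    ∀ (m : Nat),
    (List.range m).foldl (fun S r =>
        S ++ [List.zipWith (· + ·) (S.getD r []) ((List.range (n + 1)).map (pvRp Mat r))])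
      [List.replicate (n + 1) 0]
      = (List.range (m + 1)).map (fun r => (List.range (n + 1)).map (pvSval Mat r)) := by
  intro m
  induction m with
  | zero =>
    have h0 : (List.range (n + 1)).map (pvSval Mat 0) = List.replicate (n + 1) 0 := by
      rw [List.map_congr_left (l := List.range (n + 1)) (g := fun _ => (0:Int))
          (by intro a _; simp [pvSval]),
        List.map_const', List.length_range]
    simp [h0]
  | succ m ih =>
    rw [show List.range (m + 1) = List.range m ++ [m] from List.range_succ,
      List.foldl_append, ih]
    simp only [List.foldl_cons, List.foldl_nil]
    rw [PySem.List.getD_map_range _ _ _ _ (by omega)]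
    rw [show List.range (m + 1 + 1) = List.range (m + 1) ++ [m + 1] from List.range_succ,
      List.map_append]
    congr 1
    rw [List.zipWith_map, List.zipWith_self]
    show [_] = [List.map (pvSval Mat (m + 1)) (List.range (n + 1))]
    congr 1
    exact List.map_congr_left (by intro c _; simp [pvSval, Finset.sum_range_succ])

theorem pvBpref_sval (Mat : List (List Int)) (i e k : Nat) (h : i ≤ e) :
    pvSval Mat e k - pvSval Mat i k = pvBpref Mat i e k := by
  unfold pvSval pvBpref pvColS
  have hsplit : ∑ r' ∈ Finset.range e, pvRp Mat r' k
      = ∑ r' ∈ Finset.range i, pvRp Mat r' k + ∑ r ∈ Finset.Ico i e, pvRp Mat r k := by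
    rw [Finset.range_eq_Ico]
    exact (Finset.sum_Ico_consecutive (fun r' => pvRp Mat r' k) (Nat.zero_le i) h).symm
  have hsw : ∑ r ∈ Finset.Ico i e, pvRp Mat r k
      = ∑ c ∈ Finset.range k, ∑ r ∈ Finset.Ico i e, pvCell Mat r c := by
    unfold pvRp
    exact Finset.sum_comm
  omega

theorem pvColS_succ (Mat : List (List Int)) (i e k : Nat) (h : i ≤ e) :
    pvColS Mat i (e + 1) k = pvColS Mat i e k + pvCell Mat e k := by
  unfold pvColS; rw [Finset.sum_Ico_succ_top h]

theorem pvBpref_succ (Mat : List (List Int)) (i e k : Nat) :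
    pvBpref Mat i e (k + 1) = pvBpref Mat i e k + pvColS Mat i e k := by
  unfold pvBpref; rw [Finset.sum_range_succ]

-- Nat-world forms of the two programs' main loops
def pvABody (Mat : List (List Int)) (P : Int) (n : Nat) (st : List Int × Int) (j : Nat) :
    List Int × Int :=
  let sums := (List.range n).foldl (fun s k => s.set k (s.getD k 0 + pvCell Mat j k)) st.1
  (sums, ((List.range n).foldl (fun (st2 : List Int × Int × Int) k =>
      let x := PySem.Int.mod (st2.2.1 + sums.getD k 0) P
      (PySem.List.pySetD st2.1 x (PySem.List.pyGetD st2.1 x 0 + 1), x,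
        st2.2.2 + PySem.List.pyGetD st2.1 x 0)) (pvCounts0, 0, st.2)).2.2)

def pvBBody (P : Int) (S : List (List Int)) (n i : Nat) (res : Int) (j : Nat) : Int :=
  (((PySem.List.sorted ((List.range (n + 1)).map (fun k =>
      PySem.Int.mod ((S.getD (j + 1) []).getD k 0 - (S.getD i []).getD k 0) P))
      (fun x => x) false)).foldl (fun (st : Option Int × Int × Int) v =>
        if st.1 = some v then (st.1, st.2.1 + 1, st.2.2 + st.2.1)
        else (some v, 1, st.2.2)) (none, 0, res)).2.2

def pvA (Mat : List (List Int)) (P : Int) (n m : Nat) : Int :=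
  (List.range m).foldl (fun res i =>
    ((List.range (m - i)).foldl (fun st t => pvABody Mat P n st (i + t))
      (List.replicate n 0, res)).2) 0

def pvB (Mat : List (List Int)) (P : Int) (S : List (List Int)) (n m : Nat) : Int :=
  (List.range m).foldl (fun res i =>
    (List.range (m - i)).foldl (fun res t => pvBBody P S n i res (i + t)) res) 0

-- the j-loop coupling: A's rolling sums + counter counting = B's table reads + sorted run scan
theorem pvJloop (Mat : List (List Int)) (P : Int) (hP : P ≠ 0) (hl : -200 ≤ P) (hr : P ≤ 200)
    (n m : Nat) (S : List (List Int))
    (hS : S = (List.range (m + 1)).map (fun r => (List.range (n + 1)).map (pvSval Mat r)))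
    (iN : Nat) :
    ∀ (cnt e : Nat), iN ≤ e → e + cnt ≤ m → ∀ (res : Int),
    ((List.range cnt).foldl (fun st t => pvABody Mat P n st (e + t))
        ((List.range n).map (pvColS Mat iN e), res)).2
    = (List.range cnt).foldl (fun res t => pvBBody P S n iN res (e + t)) res := by
  intro cnt
  induction cnt with
  | zero => intro e h1 h2 res; simp
  | succ cnt ih =>
    intro e h1 h2 res
    rw [List.range_succ_eq_map, List.foldl_cons, List.foldl_cons,
      List.foldl_map, List.foldl_map]
    have heq1 : (fun (st : List Int × Int) (t : Nat) => pvABody Mat P n st (e + Nat.succ t))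
        = fun st t => pvABody Mat P n st ((e + 1) + t) := by
      funext st t
      have : e + Nat.succ t = (e + 1) + t := by omega
      rw [this]
    have heq2 : (fun (res : Int) (t : Nat) => pvBBody P S n iN res (e + Nat.succ t))
        = fun res t => pvBBody P S n iN res ((e + 1) + t) := by
      funext res t
      have : e + Nat.succ t = (e + 1) + t := by omega
      rw [this]
    rw [heq1, heq2]
    simp only [Nat.add_zero]
    -- first iteration: row e
    have hsums : pvABody Mat P n ((List.range n).map (pvColS Mat iN e), res) e
        = ((List.range n).map (pvColS Mat iN (e + 1)),
            ((List.range n).foldl (fun (st2 : List Int × Int × Int) k =>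
              let x := PySem.Int.mod (st2.2.1 + pvColS Mat iN (e + 1) k) P
              (PySem.List.pySetD st2.1 x (PySem.List.pyGetD st2.1 x 0 + 1), x,
                st2.2.2 + PySem.List.pyGetD st2.1 x 0)) (pvCounts0, 0, res)).2.2) := by
      unfold pvABody
      have hupd : (List.range n).foldl (fun s k => s.set k (s.getD k 0 + pvCell Mat e k))
          ((List.range n).map (pvColS Mat iN e))
          = (List.range n).map (pvColS Mat iN (e + 1)) := by
        have := pvAddLoop (pvCell Mat e) (pvColS Mat iN e) n []
        simp only [List.append_nil] at this
        rw [this]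
        exact List.map_congr_left (by intro k _; rw [pvColS_succ Mat iN e k h1])
      rw [hupd]
      simp only []
      congr 1
      refine congrArg (fun p : List Int × Int × Int => p.2.2)
        (PySem.List.foldl_congr_mem _ _ _ _ ?_)
      intro acc k hk
      rw [PySem.List.getD_map_range _ _ _ _ (List.mem_range.mp hk)]
    rw [hsums]
    -- residues: A's counter count = B's sorted run-scan count (both = the pair count)
    have hcount : ((List.range n).foldl (fun (st2 : List Int × Int × Int) k =>
          let x := PySem.Int.mod (st2.2.1 + pvColS Mat iN (e + 1) k) P
          (PySem.List.pySetD st2.1 x (PySem.List.pyGetD st2.1 x 0 + 1), x,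
            st2.2.2 + PySem.List.pyGetD st2.1 x 0)) (pvCounts0, 0, res)).2.2
        = pvBBody P S n iN res e := by
      -- A side: pvCntA with G = pvBpref, seen = [0]
      have hG0 : (0 : Int) = PySem.Int.mod (pvBpref Mat iN (e + 1) 0) P := by
        have h0 : pvBpref Mat iN (e + 1) 0 = 0 := by simp [pvBpref]
        rw [h0]
        exact (Int.zero_fmod P).symm
      have hinit : ((pvCounts0, (0:Int), res) : List Int × Int × Int)
          = (pvCounts0, PySem.Int.mod (pvBpref Mat iN (e + 1) 0) P, res) := by
        rw [← hG0]
      have hA : ((List.range n).foldl (fun (st2 : List Int × Int × Int) k =>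
            let x := PySem.Int.mod (st2.2.1 + pvColS Mat iN (e + 1) k) P
            (PySem.List.pySetD st2.1 x (PySem.List.pyGetD st2.1 x 0 + 1), x,
              st2.2.2 + PySem.List.pyGetD st2.1 x 0)) (pvCounts0, 0, res)).2.2
          = res + pvPC ([(0:Int)] ++ (List.range' 0 n).map
              (fun k => PySem.Int.mod (pvBpref Mat iN (e + 1) (k + 1)) P)) := by
        rw [hinit, List.range_eq_range']
        rw [pvCntA P hP hl hr (pvColS Mat iN (e + 1)) (pvBpref Mat iN (e + 1))
          (pvBpref_succ Mat iN (e + 1)) n 0 pvCounts0 [(0:Int)] res pvCounts0_len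
          (pvInitCoupling P hP hl hr)]
        simp [pvPC]
      rw [hA]
      -- B side: the residue list read from the table
      have hBL : (List.range (n + 1)).map (fun k =>
            PySem.Int.mod ((S.getD (e + 1) []).getD k 0 - (S.getD iN []).getD k 0) P)
          = (List.range (n + 1)).map (fun k => PySem.Int.mod (pvBpref Mat iN (e + 1) k) P) := by
        apply List.map_congr_left
        intro k hk
        have hkn := List.mem_range.mp hk
        have hrow1 : S.getD (e + 1) [] = (List.range (n + 1)).map (pvSval Mat (e + 1)) := by
          rw [hS]; exact PySem.List.getD_map_range _ _ _ _ (by omega)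
        have hrow2 : S.getD iN [] = (List.range (n + 1)).map (pvSval Mat iN) := by
          rw [hS]; exact PySem.List.getD_map_range _ _ _ _ (by omega)
        rw [hrow1, hrow2, PySem.List.getD_map_range _ _ _ _ (by omega),
          PySem.List.getD_map_range _ _ _ _ (by omega),
          pvBpref_sval Mat iN (e + 1) k (by omega)]
      have hlist : [(0:Int)] ++ (List.range' 0 n).map
            (fun k => PySem.Int.mod (pvBpref Mat iN (e + 1) (k + 1)) P)
          = (List.range (n + 1)).map (fun k => PySem.Int.mod (pvBpref Mat iN (e + 1) k) P) := by
        rw [List.range_succ_eq_map, List.map_cons, List.map_map, ← List.range_eq_range']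
        have h0 : PySem.Int.mod (pvBpref Mat iN (e + 1) 0) P = 0 := by
          have h0' : pvBpref Mat iN (e + 1) 0 = 0 := by simp [pvBpref]
          rw [h0']
          exact Int.zero_fmod P
        rw [h0]
        rfl
      unfold pvBBody
      rw [hBL]
      set BL := (List.range (n + 1)).map (fun k => PySem.Int.mod (pvBpref Mat iN (e + 1) k) P)
        with hBLdef
      have hpair : (PySem.List.sorted BL (fun x => x) false).Pairwise (· ≤ ·) := by
        have := PySem.List.sorted_pairwise BL (fun x => x)
        simpa using this
      rw [pvRunNone _ hpair res]
      rw [hlist]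
      congr 1
      exact pvPC_perm (PySem.List.sorted_perm BL (fun x => x) false).symm
    rw [hcount]
    exact ih (e + 1) (by omega) (by omega) _

theorem pvRangeNat (N : Int) :
    PySem.List.pyRange 0 N 1 = (List.range N.toNat).map (fun k : Nat => (k : Int)) := by
  rw [PySem.List.pyRange_one]
  simp

theorem pvABody_conv (Mat : List (List Int)) (P N : Int) (st : List Int × Int) (j : Nat) :
    (let counts0 : List Int := PySem.List.pySetD (List.replicate 200 (0:Int)) 0 1
     let sums := (PySem.List.pyRange 0 N 1).foldl (fun s k =>
         PySem.List.pySetD s k (PySem.List.pyGetD s k 0 +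
           PySem.List.pyGetD (PySem.List.pyGetD Mat (j:Int) []) k 0)) st.1
     let fin := (PySem.List.pyRange 0 N 1).foldl (fun (st2 : List Int × Int × Int) k =>
         let x := PySem.Int.mod (st2.2.1 + PySem.List.pyGetD sums k 0) P
         (PySem.List.pySetD st2.1 x (PySem.List.pyGetD st2.1 x 0 + 1), x,
           st2.2.2 + PySem.List.pyGetD st2.1 x 0)) (counts0, 0, st.2)
     (sums, fin.2.2))
    = pvABody Mat P N.toNat st j := by
  have hc : (PySem.List.pySetD (List.replicate 200 (0:Int)) 0 1 : List Int) = pvCounts0 := by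
    rw [PySem.List.pySetD_of_nonneg _ _ le_rfl]; rfl
  simp only [pvRangeNat, hc, List.foldl_map]
  have hsums : ∀ (s0 : List Int), (List.range N.toNat).foldl (fun s (k : Nat) =>
      PySem.List.pySetD s (k:Int) (PySem.List.pyGetD s (k:Int) 0 +
        PySem.List.pyGetD (PySem.List.pyGetD Mat (j:Int) []) (k:Int) 0)) s0
      = (List.range N.toNat).foldl (fun s k => s.set k (s.getD k 0 + pvCell Mat j k)) s0 := by
    intro s0
    apply PySem.List.foldl_congr_mem
    intro acc k _
    simp [pvCell]
  rw [hsums]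
  unfold pvABody
  simp only []
  congr 1
  refine congrArg (fun p : List Int × Int × Int => p.2.2)
    (PySem.List.foldl_congr_mem _ _ _ _ ?_)
  intro acc k _
  simp only [PySem.List.pyGetD_natCast]

theorem pvA_conv (M N P : Int) (Mat : List (List Int)) :
    Solve M N P Mat = pvA Mat P N.toNat M.toNat := by
  unfold Solve pvA
  rw [pvRangeNat M, List.foldl_map]
  apply PySem.List.foldl_congr_mem
  intro res i hi
  simp only []
  have hiM : i < M.toNat := List.mem_range.mp hi
  have hM0 : 0 ≤ M := by omega
  rw [PySem.List.pyRange_one (↑i) M]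
  have hcast : (M - (i:Int)).toNat = M.toNat - i := by omega
  rw [hcast, List.foldl_map]
  refine congrArg (fun p : List Int × Int => p.2) (PySem.List.foldl_congr_mem _ _ _ _ ?_)
  intro st t _
  have hj : ((i:Int) + (t:Int)) = (((i + t : Nat)) : Int) := by push_cast; ring
  rw [hj]
  exact pvABody_conv Mat P N st (i + t)

theorem pvBBody_conv (P N : Int) (hN : 0 < N) (S : List (List Int)) (i j : Nat) (res : Int) :
    (let rs := PySem.List.sorted ((PySem.List.pyRange 0 (N + 1) 1).map (fun k =>
        PySem.Int.mod (PySem.List.pyGetD (PySem.List.pyGetD S ((j:Int) + 1) []) k 0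
          - PySem.List.pyGetD (PySem.List.pyGetD S (i:Int) []) k 0) P)) (fun x => x) false
     (rs.foldl (fun (st : Option Int × Int × Int) v =>
        if st.1 = some v then (st.1, st.2.1 + 1, st.2.2 + st.2.1)
        else (some v, 1, st.2.2)) (none, 0, res)).2.2)
    = pvBBody P S N.toNat i res j := by
  have hcast : (N + 1).toNat = N.toNat + 1 := by omega
  rw [pvRangeNat (N + 1), hcast, List.map_map]
  unfold pvBBody
  have hmaps : (List.range (N.toNat + 1)).map ((fun k : Int =>
        PySem.Int.mod (PySem.List.pyGetD (PySem.List.pyGetD S ((j:Int) + 1) []) k 0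
          - PySem.List.pyGetD (PySem.List.pyGetD S (i:Int) []) k 0) P) ∘ (fun k : Nat => (k:Int)))
      = (List.range (N.toNat + 1)).map (fun k : Nat =>
        PySem.Int.mod ((S.getD (j + 1) []).getD k 0 - (S.getD i []).getD k 0) P) := by
    apply List.map_congr_left
    intro k _
    simp only [Function.comp]
    have h1 : ((j:Int) + 1) = (((j + 1 : Nat)) : Int) := by push_cast; ring
    rw [h1]
    simp only [PySem.List.pyGetD_natCast]
  rw [hmaps]

theorem pvS_conv (M N : Int) (Mat : List (List Int)) (hN : 0 < N) :
    ((PySem.List.pyRange 0 M 1).foldl (fun S r =>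
        let rp := (PySem.List.pyRange 0 N 1).foldl (fun rp c =>
            rp ++ [PySem.List.pyGetD rp c 0 +
              PySem.List.pyGetD (PySem.List.pyGetD Mat r []) c 0]) [0]
        S ++ [List.zipWith (· + ·) (PySem.List.pyGetD S r []) rp])
      [List.replicate (N + 1).toNat 0])
    = (List.range (M.toNat + 1)).map (fun r => (List.range (N.toNat + 1)).map (pvSval Mat r)) := by
  have h0 : (N + 1).toNat = N.toNat + 1 := by omega
  rw [pvRangeNat M, List.foldl_map, h0]
  have hbody : ∀ (S : List (List Int)), ∀ r ∈ List.range M.toNat,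
      (let rp := (PySem.List.pyRange 0 N 1).foldl (fun rp c =>
          rp ++ [PySem.List.pyGetD rp c 0 +
            PySem.List.pyGetD (PySem.List.pyGetD Mat ((r:Nat):Int) []) c 0]) [0]
       S ++ [List.zipWith (· + ·) (PySem.List.pyGetD S ((r:Nat):Int) []) rp])
      = S ++ [List.zipWith (· + ·) (S.getD r [])
          ((List.range (N.toNat + 1)).map (pvRp Mat r))] := by
    intro S r _
    have hrp : (PySem.List.pyRange 0 N 1).foldl (fun rp c =>
        rp ++ [PySem.List.pyGetD rp c 0 +
          PySem.List.pyGetD (Mat.getD r []) c 0]) [0]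
        = (List.range (N.toNat + 1)).map (pvRp Mat r) := by
      rw [pvRangeNat N, List.foldl_map, ← pvRpBuild Mat r N.toNat]
      apply PySem.List.foldl_congr_mem
      intro acc c _
      simp [pvCell]
    simp only [PySem.List.pyGetD_natCast]
    rw [hrp]
  rw [PySem.List.foldl_congr_mem _ _ _ _ hbody]
  exact pvSBuild Mat N.toNat M.toNat

theorem pvB_conv (M N P : Int) (Mat : List (List Int)) (hM : 0 < M) (hN : 0 < N) :
    Solve_alt M N P Mat
      = pvB Mat P ((List.range (M.toNat + 1)).map
          (fun r => (List.range (N.toNat + 1)).map (pvSval Mat r))) N.toNat M.toNat := by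
  unfold Solve_alt pvB
  rw [if_neg (by omega)]
  simp only []
  rw [pvS_conv M N Mat hN]
  rw [pvRangeNat M, List.foldl_map]
  apply PySem.List.foldl_congr_mem
  intro res i hi
  have hiM : i < M.toNat := List.mem_range.mp hi
  rw [PySem.List.pyRange_one (↑i) M]
  have hcast : (M - (i:Int)).toNat = M.toNat - i := by omega
  rw [hcast, List.foldl_map]
  apply PySem.List.foldl_congr_mem
  intro racc t _
  have hj : ((i:Int) + (t:Int)) = (((i + t : Nat)) : Int) := by push_cast; ring
  rw [hj]
  exact pvBBody_conv P N hN _ i (i + t) racc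

-- ===== VERDICT (by name: the statement is the Claim_ definition above) =====
theorem Solve_spec : Claim_equal_Solve := by
  unfold Claim_equal_Solve
  intro M N P Mat hdom hpre
  unfold Spec_Solve
  by_cases hM : M ≤ 0
  · have h1 : PySem.List.pyRange 0 M 1 = [] := PySem.List.pyRange_one_eq_nil hM
    simp [Solve, Solve_alt, h1, hM]
  by_cases hN : N ≤ 0
  · have h1 : PySem.List.pyRange 0 N 1 = [] := PySem.List.pyRange_one_eq_nil hN
    have hb : (fun (st : List Int × Int) (_ : Int) => (st.1, st.2)) = fun st _ => st := by
      funext st j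
      exact Prod.mk.eta
    rw [show Solve_alt M N P Mat = 0 from by unfold Solve_alt; rw [if_pos (Or.inr hN)]]
    simp only [Solve, h1, List.foldl_nil, hb, pv_foldl_id]
  have hM' : 0 < M := by omega
  have hN' : 0 < N := by omega
  have hPc : P ≠ 0 ∧ -200 ≤ P ∧ P ≤ 200 := by
    rcases hpre with h | h | h
    · omega
    · omega
    · exact ⟨h.1, h.2.1, h.2.2.1⟩
  obtain ⟨hP, hPl, hPr⟩ := hPc
  rw [pvA_conv M N P Mat, pvB_conv M N P Mat hM' hN']
  unfold pvA pvB
  apply PySem.List.foldl_congr_mem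
  intro res i hi
  have hi' : i < M.toNat := List.mem_range.mp hi
  have hrep : (List.replicate N.toNat (0:Int)) = (List.range N.toNat).map (pvColS Mat i i) := by
    rw [List.map_congr_left (l := List.range N.toNat) (g := fun _ => (0:Int))
        (by intro k _; simp [pvColS]),
      List.map_const', List.length_range]
  rw [hrep]
  exact pvJloop Mat P hP hPl hPr N.toNat M.toNat _ rfl i (M.toNat - i) i le_rfl
    (by omega) res
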